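-- pv_equiv track=rewrite | github.com/YashB63/GFG-Daily-Questions | Day 592/Find length of longest subsequence/find_length_of_longest_subsequence.py | maxSubsequenceSubstring
-- ===== SOURCE A (Python) =====
-- def maxSubsequenceSubstring(X, Y, N, M):
--     dp = [[0] * (N + 1) for _ in range(M + 1)]
--
--     for i in range(1, M + 1):
--         for j in range(1, N + 1):
--             if X[j - 1] == Y[i - 1]:
--                 dp[i][j] = 1 + dp[i - 1][j - 1]
--             else:
--                 dp[i][j] = dp[i][j - 1]
--
--     ans = 0
--     for i in range(1, M + 1):
--         ans = max(ans, dp[i][N])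
--
--     return ans
-- ===== SOURCE B (Python) =====
-- # B: per-start greedy one-pointer subsequence scans instead of the (M+1)x(N+1) DP table; O(1) space.
-- def maxSubsequenceSubstring(X, Y, N, M):
--     # For each start s, greedily match the substring Y[s:] as a subsequence of X
--     # with a single pointer; track the best consecutive match length.
--     ans = 0
--     for s in range(M):
--         j = 0
--         cnt = 0
--         for i in range(s, M):
--             while j < N and X[j] != Y[i]:
--                 j += 1
--             if j >= N:
--                 break
--             j += 1
--             cnt += 1
--         if cnt > ans:
--             ans = cnt
--     return ans
-- ===== Notes on version B (the rewrite author's own statement) =====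
-- stated objective: faster
-- what changed: Replaces the (M+1)x(N+1) DP table with repeated greedy one-pointer subsequence scans: for each start s the substring Y[s:] is matched greedily into X and the longest consecutive run is kept; no table is allocated and scans stop early, which a timing run measured as a constant-factor speedup (B's worst case is O(M*(M+N)) vs A's O(M*N)).
import Mathlib
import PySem

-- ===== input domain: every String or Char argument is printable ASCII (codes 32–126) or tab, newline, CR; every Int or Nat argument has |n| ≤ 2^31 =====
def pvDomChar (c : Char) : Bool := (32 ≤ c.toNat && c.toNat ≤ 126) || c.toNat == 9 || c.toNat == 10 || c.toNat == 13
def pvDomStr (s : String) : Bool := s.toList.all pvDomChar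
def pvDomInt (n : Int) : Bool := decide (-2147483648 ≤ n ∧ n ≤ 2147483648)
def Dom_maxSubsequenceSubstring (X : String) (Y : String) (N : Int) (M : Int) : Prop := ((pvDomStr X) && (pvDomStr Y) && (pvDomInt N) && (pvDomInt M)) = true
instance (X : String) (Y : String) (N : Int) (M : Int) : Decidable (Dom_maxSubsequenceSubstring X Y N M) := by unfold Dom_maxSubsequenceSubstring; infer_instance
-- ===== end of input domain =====

-- B replaces A's (M+1)x(N+1) DP table with per-start greedy one-pointer subsequence scans
-- in O(1) space (same return value on Pre_; a timing run measured B faster).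

-- ===== PORT A =====
-- dp[i][j] read (Pre_ keeps the indices A uses in range)
def pvGet2 (dp : List (List Int)) (i j : Int) : Int :=
  PySem.List.pyGetD (PySem.List.pyGetD dp i []) j 0

-- dp[i][j] = v write
def pvSet2 (dp : List (List Int)) (i j : Int) (v : Int) : List (List Int) :=
  PySem.List.pySetD dp i (PySem.List.pySetD (PySem.List.pyGetD dp i []) j v)

-- the body of A's inner loop: dp[i][j] = 1 + dp[i-1][j-1] if X[j-1] == Y[i-1] else dp[i][j-1]
def pvColf (X Y : String) (dp : List (List Int)) (i j : Int) : List (List Int) :=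
  if PySem.Str.pyGet? X (j-1) = PySem.Str.pyGet? Y (i-1)
  then pvSet2 dp i j (1 + pvGet2 dp (i-1) (j-1))
  else pvSet2 dp i j (pvGet2 dp i (j-1))

-- A's inner loop: for j in range(1, N+1)
def pvRowLoop (X Y : String) (N : Int) (dp : List (List Int)) (i : Int) : List (List Int) :=
  (PySem.List.pyRange 1 (N+1) 1).foldl (fun dp j => pvColf X Y dp i j) dp

def maxSubsequenceSubstring (X : String) (Y : String) (N : Int) (M : Int) : Int :=
  let dp0 := (PySem.List.pyRange 0 (M+1) 1).map (fun _ => List.replicate (N+1).toNat (0:Int))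
  let dp := (PySem.List.pyRange 1 (M+1) 1).foldl (pvRowLoop X Y N) dp0
  (PySem.List.pyRange 1 (M+1) 1).foldl (fun ans i => max ans (pvGet2 dp i N)) 0

-- ===== PORT B =====
-- the 'while j < N and X[j] != Y[i]: j += 1' loop
def pvFind (X : String) (N : Int) (c : Option Char) (j : Int) : Int :=
  if h : j < N then
    if PySem.Str.pyGet? X j ≠ c then pvFind X N c (j+1) else j
  else j
termination_by (N - j).toNat
decreasing_by omega

-- the 'for i in range(s, M): … break' loop, state (j, cnt)
def pvInner (X Y : String) (N M : Int) (i j cnt : Int) : Int :=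
  if h : i < M then
    let j' := pvFind X N (PySem.Str.pyGet? Y i) j
    if N ≤ j' then cnt
    else pvInner X Y N M (i+1) (j'+1) (cnt+1)
  else cnt
termination_by (M - i).toNat
decreasing_by omega

def maxSubsequenceSubstring_alt (X : String) (Y : String) (N : Int) (M : Int) : Int :=
  (PySem.List.pyRange 0 M 1).foldl (fun ans s =>
    let cnt := pvInner X Y N M s 0 0
    if ans < cnt then cnt else ans) 0

-- ===== PRECONDITION & SPEC =====
-- Pre_ excludes exactly the inputs on which A raises IndexError: M ≥ 1 together with
-- N < 0, N > len(X), or (1 ≤ N and M > len(Y)); everywhere A returns, Pre_ holds.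
def Pre_maxSubsequenceSubstring (X : String) (Y : String) (N : Int) (M : Int) : Prop :=
  M ≤ 0 ∨ (0 ≤ N ∧ N ≤ PySem.Str.len X ∧ (N = 0 ∨ M ≤ PySem.Str.len Y))
instance (X : String) (Y : String) (N : Int) (M : Int) : Decidable (Pre_maxSubsequenceSubstring X Y N M) := by unfold Pre_maxSubsequenceSubstring; infer_instance

def pvWitness_maxSubsequenceSubstring : String × String × Int × Int := ("abca", "bac", 4, 3)

def Spec_maxSubsequenceSubstring (X : String) (Y : String) (N : Int) (M : Int) (out : Int) : Prop := out = maxSubsequenceSubstring_alt X Y N M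
instance (X : String) (Y : String) (N : Int) (M : Int) (out : Int) : Decidable (Spec_maxSubsequenceSubstring X Y N M out) := by unfold Spec_maxSubsequenceSubstring; infer_instance

-- ===== CLAIM (what is proved, stated in full; the proofs are below) =====
def Claim_equal_maxSubsequenceSubstring : Prop := ∀ (X : String) (Y : String) (N : Int) (M : Int), Dom_maxSubsequenceSubstring X Y N M → Pre_maxSubsequenceSubstring X Y N M → Spec_maxSubsequenceSubstring X Y N M (maxSubsequenceSubstring X Y N M)

-- ===== LEMMAS AND PROOFS =====

/- ## Pure specifications -/

-- greedy: suffix of xs after the first occurrence of c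
def pvSeek (c : Char) : List Char → Option (List Char)
  | [] => none
  | x :: xs => if x = c then some xs else pvSeek c xs

-- greedy count of ys matched left-to-right into xs
def pvG : List Char → List Char → Nat
  | [], _ => 0
  | y :: ys, xs =>
    match pvSeek y xs with
    | none => 0
    | some r => 1 + pvG ys r

-- the DP recurrence of A, as a pure function (i indexes v = Y side, j indexes u = X side)
def pvDpf (u v : List Char) : Nat → Nat → Int
  | 0, _ => 0
  | _ + 1, 0 => 0
  | i + 1, j + 1 =>
    if u.getD j 'a' = v.getD i 'a' then 1 + pvDpf u v i j else pvDpf u v (i+1) j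
termination_by i j => (i, j)

/- ## Sublist toolkit -/

theorem pv_cons_sub_of_ne {a b : Char} {l t : List Char} (hne : a ≠ b)
    (h : List.Sublist (a :: l) (b :: t)) : List.Sublist (a :: l) t := by
  cases h with
  | cons _ h => exact h
  | cons₂ => exact absurd rfl hne

theorem pvS1 {l t : List Char} {a : Char} (h : List.Sublist (l ++ [a]) (t ++ [a])) :
    List.Sublist l t := by
  have h' := h.reverse
  simp only [List.reverse_append, List.reverse_cons, List.reverse_nil, List.nil_append,
    List.cons_append] at h'
  have := (List.cons_sublist_cons).mp h'
  simpa using this.reverse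

theorem pvS2 {l t : List Char} {a b : Char} (hne : a ≠ b)
    (h : List.Sublist (l ++ [a]) (t ++ [b])) : List.Sublist (l ++ [a]) t := by
  have h' := h.reverse
  simp only [List.reverse_append, List.reverse_cons, List.reverse_nil, List.nil_append,
    List.singleton_append] at h'
  have h2 := pv_cons_sub_of_ne hne h'
  have h3 := h2.reverse
  simpa using h3

/- ## Greedy characterisation -/

theorem pvSeek_of_cons_sublist {y : Char} {l xs : List Char} (h : List.Sublist (y :: l) xs) :
    ∃ r, pvSeek y xs = some r ∧ List.Sublist l r := by
  induction xs with
  | nil => cases h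
  | cons x xs ih =>
    by_cases hx : x = y
    · subst hx
      refine ⟨xs, by simp [pvSeek], ?_⟩
      cases h with
      | cons _ h => exact (List.sublist_cons_self _ _).trans h
      | cons₂ _ h => exact h
    · have h' : List.Sublist (y :: l) xs := pv_cons_sub_of_ne (fun he => hx he.symm) h
      obtain ⟨r, hr, hl⟩ := ih h'
      exact ⟨r, by simp [pvSeek, hx, hr], hl⟩

theorem pvSeek_sound {y : Char} {xs r : List Char} (h : pvSeek y xs = some r) :
    ∀ l, List.Sublist l r → List.Sublist (y :: l) xs := by
  induction xs with
  | nil => simp [pvSeek] at h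
  | cons x xs ih =>
    intro l hl
    by_cases hx : x = y
    · subst hx
      simp [pvSeek] at h
      subst h
      exact List.Sublist.cons₂ _ hl
    · simp [pvSeek, hx] at h
      exact (ih h l hl).cons _

theorem pvG_take_sublist (ys : List Char) : ∀ xs, List.Sublist (ys.take (pvG ys xs)) xs := by
  induction ys with
  | nil => intro xs; simp [pvG]
  | cons y ys ih =>
    intro xs
    cases hs : pvSeek y xs with
    | none => simp [pvG, hs]
    | some r =>
      simp only [pvG, hs]
      rw [Nat.add_comm, List.take_succ_cons]
      exact pvSeek_sound hs _ (ih r)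

theorem pvG_ge (ys : List Char) :
    ∀ xs p, List.Sublist (ys.take p) xs → min p ys.length ≤ pvG ys xs := by
  induction ys with
  | nil => intro xs p _; simp
  | cons y ys ih =>
    intro xs p hp
    cases p with
    | zero => simp
    | succ p =>
      simp only [List.take_succ_cons] at hp
      obtain ⟨r, hr, hl⟩ := pvSeek_of_cons_sublist hp
      have := ih r p hl
      simp only [pvG, hr, List.length_cons]
      omega

theorem pvG_le_length (ys : List Char) : ∀ xs, pvG ys xs ≤ ys.length := by
  induction ys with
  | nil => intro xs; simp [pvG]
  | cons y ys ih =>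
    intro xs
    cases hs : pvSeek y xs with
    | none => simp [pvG, hs]
    | some r =>
      simp only [pvG, hs, List.length_cons]
      have := ih r
      omega

/- ## DP characterisation -/

theorem pvDpf_nonneg (u v : List Char) (i j : Nat) : 0 ≤ pvDpf u v i j := by
  induction i, j using pvDpf.induct u v with
  | case1 => simp [pvDpf]
  | case2 => simp [pvDpf]
  | case3 i j hc ih => simp only [pvDpf, if_pos hc]; omega
  | case4 i j hc ih => simpa only [pvDpf, if_neg hc] using ih

theorem pvTakeMono (l : List Char) (j : Nat) : List.Sublist (l.take j) (l.take (j+1)) := by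
  by_cases h : j < l.length
  · rw [List.take_succ_eq_append_getElem h]
    exact List.sublist_append_left _ _
  · rw [List.take_of_length_le (by omega), List.take_of_length_le (by omega)]

theorem pvSegSucc (v : List Char) (i k : Nat) (hk : k ≤ i) (hi : i < v.length) :
    (v.take (i+1)).drop (i - k) = (v.take i).drop (i - k) ++ [v[i]] := by
  rw [List.take_succ_eq_append_getElem hi, List.drop_append_of_le_length]
  rw [List.length_take]; omega

-- dpf achieves a valid segment: ∃ k, dpf i j = k and v[i-k:i] is a sublist of u[:j]
theorem pvM1 (u v : List Char) : ∀ i j : Nat, i ≤ v.length → j ≤ u.length →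
    ∃ k : Nat, k ≤ i ∧ pvDpf u v i j = (k : Int) ∧
      List.Sublist ((v.take i).drop (i - k)) (u.take j) := by
  intro i j
  induction i, j using pvDpf.induct u v with
  | case1 j =>
    intro _ _
    exact ⟨0, le_refl 0, by simp [pvDpf], by simp⟩
  | case2 i =>
    intro _ _
    refine ⟨0, by omega, by simp [pvDpf], ?_⟩
    rw [List.drop_eq_nil_of_le (by rw [List.length_take]; omega)]
    exact List.nil_sublist _
  | case3 i j hc ih =>
    intro hi hj
    obtain ⟨k, hk, hval, hsub⟩ := ih (by omega) (by omega)
    have hiv : i < v.length := by omega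
    have hju : j < u.length := by omega
    refine ⟨k+1, by omega, ?_, ?_⟩
    · simp only [pvDpf, if_pos hc, hval]; push_cast; ring
    · have hvi : u[j] = v[i] := by
        rw [List.getD_eq_getElem u 'a' hju, List.getD_eq_getElem v 'a' hiv] at hc
        exact hc
      have e1 : (i+1) - (k+1) = i - k := by omega
      rw [e1, pvSegSucc v i k hk hiv, List.take_succ_eq_append_getElem hju, hvi]
      exact List.Sublist.append hsub (List.Sublist.refl _)
  | case4 i j hc ih =>
    intro hi hj
    obtain ⟨k, hk, hval, hsub⟩ := ih hi (by omega)
    refine ⟨k, hk, by simp only [pvDpf, if_neg hc]; exact hval, ?_⟩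
    exact hsub.trans (pvTakeMono u j)

-- dpf dominates every valid segment ending at i
theorem pvM2 (u v : List Char) : ∀ i j : Nat, i ≤ v.length → j ≤ u.length →
    ∀ k : Nat, k ≤ i → List.Sublist ((v.take i).drop (i - k)) (u.take j) →
      (k : Int) ≤ pvDpf u v i j := by
  intro i j
  induction i, j using pvDpf.induct u v with
  | case1 j =>
    intro _ _ k hk _
    interval_cases k
    simp [pvDpf]
  | case2 i =>
    intro hi _ k hk hsub
    have h2 : i < i + 1 - k ∨ v.length ≤ i + 1 - k := by simpa using hsub
    have hk0 : k = 0 := by omega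
    subst hk0
    simp [pvDpf]
  | case3 i j hc ih =>
    intro hi hj k hk hsub
    have hiv : i < v.length := by omega
    have hju : j < u.length := by omega
    cases k with
    | zero => simpa using pvDpf_nonneg u v (i+1) (j+1)
    | succ k =>
      have hvi : u[j] = v[i] := by
        rw [List.getD_eq_getElem u 'a' hju, List.getD_eq_getElem v 'a' hiv] at hc
        exact hc
      have e1 : (i+1) - (k+1) = i - k := by omega
      rw [e1, pvSegSucc v i k (by omega) hiv, List.take_succ_eq_append_getElem hju, hvi] at hsub
      have := ih (by omega) (by omega) k (by omega) (pvS1 hsub)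
      simp only [pvDpf, if_pos hc]
      push_cast
      omega
  | case4 i j hc ih =>
    intro hi hj k hk hsub
    have hiv : i < v.length := by omega
    have hju : j < u.length := by omega
    simp only [pvDpf, if_neg hc]
    cases k with
    | zero => simpa using pvDpf_nonneg u v (i+1) j
    | succ k =>
      have hne : v[i] ≠ u[j] := by
        intro he
        exact hc (by rw [List.getD_eq_getElem u 'a' hju, List.getD_eq_getElem v 'a' hiv, he])
      have e1 : (i+1) - (k+1) = i - k := by omega
      rw [e1, pvSegSucc v i k (by omega) hiv, List.take_succ_eq_append_getElem hju] at hsub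
      have hsub' := pvS2 hne hsub
      rw [← pvSegSucc v i k (by omega) hiv, ← e1] at hsub'
      exact ih hi (by omega) (k+1) hk hsub'

/- ## fold-max toolkit -/

theorem pvF0 {α : Type} (l : List α) (f : α → Int) :
    ∀ a : Int, a ≤ l.foldl (fun x y => max x (f y)) a := by
  induction l with
  | nil => intro a; simp
  | cons x l ih =>
    intro a
    exact le_trans (le_max_left a (f x)) (ih (max a (f x)))

theorem pvF1 {α : Type} (l : List α) (f : α → Int) :
    ∀ a : Int, ∀ x ∈ l, f x ≤ l.foldl (fun x y => max x (f y)) a := by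
  induction l with
  | nil => intro a x hx; cases hx
  | cons z l ih =>
    intro a x hx
    rcases List.mem_cons.mp hx with h | h
    · subst h
      exact le_trans (le_max_right a (f x)) (pvF0 l f _)
    · exact ih _ x h

theorem pvF2 {α : Type} (l : List α) (f : α → Int) :
    ∀ a c : Int, a ≤ c → (∀ x ∈ l, f x ≤ c) → l.foldl (fun x y => max x (f y)) a ≤ c := by
  induction l with
  | nil => intro a c h _; simpa
  | cons z l ih =>
    intro a c ha hf
    exact ih _ c (max_le ha (hf z (by simp))) (fun x hx => hf x (List.mem_cons_of_mem _ hx))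

/- ## the central combinatorial equality -/

theorem pvMain (u v : List Char) (n : Nat) (hu : u.length = n) :
    (List.range v.length).foldl (fun a t => max a (pvDpf u v (t+1) n)) 0 =
    (List.range v.length).foldl (fun a s => max a ((pvG (v.drop s) u : Int))) 0 := by
  have hun : u.take n = u := by rw [← hu]; exact List.take_length
  apply le_antisymm
  · apply pvF2
    · exact pvF0 _ _ 0
    · intro t ht
      have htm : t < v.length := List.mem_range.mp ht
      obtain ⟨k, hk, hval, hsub⟩ := pvM1 u v (t+1) n (by omega) (by omega)
      rw [hval, hun] at *
      cases Nat.eq_zero_or_pos k with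
      | inl h0 =>
        subst h0
        exact_mod_cast pvF0 _ _ 0
      | inr hpos =>
        set s := t + 1 - k with hs
        have hseg : (v.take (t+1)).drop (t+1-k) = (v.drop s).take k := by
          rw [List.drop_take, hs]
          congr 1
          omega
        rw [hseg] at hsub
        have hlen : k ≤ (v.drop s).length := by rw [List.length_drop]; omega
        have hg : k ≤ pvG (v.drop s) u := by
          have := pvG_ge (v.drop s) u k hsub
          omega
        have hsm : s ∈ List.range v.length := List.mem_range.mpr (by omega)
        calc ((k:Int)) ≤ (pvG (v.drop s) u : Int) := by exact_mod_cast hg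
          _ ≤ _ := pvF1 _ _ 0 s hsm
  · apply pvF2
    · exact pvF0 _ _ 0
    · intro t ht
      have htm : t < v.length := List.mem_range.mp ht
      set p := pvG (v.drop t) u with hp
      have hsub := pvG_take_sublist (v.drop t) u
      have hple : p ≤ v.length - t := by
        have := pvG_le_length (v.drop t) u
        rw [List.length_drop] at this
        omega
      cases Nat.eq_zero_or_pos p with
      | inl h0 =>
        rw [h0]
        exact_mod_cast pvF0 _ _ 0
      | inr hpos =>
        have hseg : (v.take (t+p)).drop (t+p-p) = (v.drop t).take p := by
          rw [show t+p-p = t from by omega, List.drop_take]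
          congr 1
          omega
        have hd : (p : Int) ≤ pvDpf u v (t+p) n := by
          apply pvM2 u v (t+p) n (by omega) (by omega) p (by omega)
          rw [hseg, hun]
          exact hsub
        have htm2 : t + p - 1 ∈ List.range v.length := List.mem_range.mpr (by omega)
        have := pvF1 (List.range v.length) (fun t => pvDpf u v (t+1) n) 0 _ htm2
        simp only at this
        rw [show t + p - 1 + 1 = t + p from by omega] at this
        exact le_trans hd this

/- ## port B = greedy -/

theorem pvFoldlCongr {α β : Type} (l : List α) (f g : β → α → β) (a : β)
    (h : ∀ b x, x ∈ l → f b x = g b x) : l.foldl f a = l.foldl g a := by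
  induction l generalizing a with
  | nil => rfl
  | cons z l ih =>
    rw [List.foldl_cons, List.foldl_cons, h a z (by simp)]
    exact ih _ (fun b x hx => h b x (List.mem_cons_of_mem _ hx))

theorem pvBFindAux (X : String) (N : Int) (c : Char) (n : Nat) (hn : (n : Int) = N)
    (hnl : n ≤ X.toList.length) (d : Nat) : ∀ (j : Int), (N - j).toNat ≤ d → 0 ≤ j → j ≤ N →
      (pvFind X N (some c) j = N ∧ pvSeek c ((X.toList.take n).drop j.toNat) = none) ∨
      (∃ jn : Nat, (jn : Int) < N ∧ j ≤ (jn : Int) ∧ pvFind X N (some c) j = (jn : Int) ∧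
        pvSeek c ((X.toList.take n).drop j.toNat) = some ((X.toList.take n).drop (jn+1))) := by
  induction d with
  | zero =>
    intro j hd hj0 hjN
    have hjeq : j = N := by omega
    subst hjeq
    left
    constructor
    · rw [pvFind]
      simp
    · rw [List.drop_eq_nil_of_le (by rw [List.length_take]; omega), pvSeek]
  | succ d ih =>
    intro j hd hj0 hjN
    by_cases h : j < N
    · have hjt : j.toNat < n := by omega
      have hjx : j.toNat < X.toList.length := by omega
      have hjtk : j.toNat < (X.toList.take n).length := by rw [List.length_take]; omega
      have hget : PySem.Str.pyGet? X j = some (X.toList[j.toNat]) := by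
        rw [PySem.Str.pyGet?_eq, show PySem.Chars.pyGet? X.toList j = PySem.List.pyGet? X.toList j from rfl,
          PySem.List.pyGet?_of_nonneg _ hj0]
        exact List.getElem?_eq_getElem hjx
      have hdrop : (X.toList.take n).drop j.toNat
          = X.toList[j.toNat] :: (X.toList.take n).drop (j.toNat + 1) := by
        rw [List.drop_eq_getElem_cons hjtk]
        congr 1
        exact List.getElem_take
      by_cases heq : X.toList[j.toNat] = c
      · right
        refine ⟨j.toNat, by omega, by omega, ?_, ?_⟩
        · rw [pvFind]
          simp only [dif_pos h, hget, heq]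
          simp
          omega
        · rw [hdrop, pvSeek]
          simp [heq]
      · have hstep : pvFind X N (some c) j = pvFind X N (some c) (j+1) := by
          rw [pvFind]
          simp only [dif_pos h, hget]
          simp [heq]
        have hseekstep : pvSeek c ((X.toList.take n).drop j.toNat)
            = pvSeek c ((X.toList.take n).drop (j.toNat + 1)) := by
          rw [hdrop, pvSeek]
          simp [heq]
        have ht1 : (j+1).toNat = j.toNat + 1 := by omega
        have hrec := ih (j+1) (by omega) (by omega) (by omega)
        rw [ht1] at hrec
        rcases hrec with ⟨hf, hs⟩ | ⟨jn, h1, h2, h3, h4⟩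
        · exact Or.inl ⟨by rw [hstep]; exact hf, by rw [hseekstep]; exact hs⟩
        · exact Or.inr ⟨jn, h1, by omega, by rw [hstep]; exact h3, by rw [hseekstep]; exact h4⟩
    · left
      constructor
      · rw [pvFind]
        simp only [dif_neg h]
        omega
      · rw [List.drop_eq_nil_of_le (by rw [List.length_take]; omega), pvSeek]

theorem pvBFind (X : String) (N : Int) (c : Char) (n : Nat) (hn : (n : Int) = N)
    (hnl : n ≤ X.toList.length) (j : Int) (hj0 : 0 ≤ j) (hjN : j ≤ N) :
      (pvFind X N (some c) j = N ∧ pvSeek c ((X.toList.take n).drop j.toNat) = none) ∨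
      (∃ jn : Nat, (jn : Int) < N ∧ j ≤ (jn : Int) ∧ pvFind X N (some c) j = (jn : Int) ∧
        pvSeek c ((X.toList.take n).drop j.toNat) = some ((X.toList.take n).drop (jn+1))) :=
  pvBFindAux X N c n hn hnl (N - j).toNat j le_rfl hj0 hjN

theorem pvBInner (X Y : String) (N M : Int) (n m : Nat) (hn : (n : Int) = N) (hm : (m : Int) = M)
    (hnl : n ≤ X.toList.length) (hml : m ≤ Y.toList.length)
    (i j cnt : Int) (hi : 0 ≤ i) (hj0 : 0 ≤ j) (hjN : j ≤ N) :
      pvInner X Y N M i j cnt =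
        cnt + (pvG ((Y.toList.take m).drop i.toNat) ((X.toList.take n).drop j.toNat) : Int) := by
  by_cases h : i < M
  · have hit : i.toNat < m := by omega
    have hiy : i.toNat < Y.toList.length := by omega
    have hitk : i.toNat < (Y.toList.take m).length := by rw [List.length_take]; omega
    have hgetY : PySem.Str.pyGet? Y i = some (Y.toList[i.toNat]) := by
      rw [PySem.Str.pyGet?_eq, show PySem.Chars.pyGet? Y.toList i = PySem.List.pyGet? Y.toList i from rfl,
        PySem.List.pyGet?_of_nonneg _ hi]
      exact List.getElem?_eq_getElem hiy
    have hdropY : (Y.toList.take m).drop i.toNat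
        = Y.toList[i.toNat] :: (Y.toList.take m).drop (i.toNat + 1) := by
      rw [List.drop_eq_getElem_cons hitk]
      congr 1
      exact List.getElem_take
    rcases pvBFind X N (Y.toList[i.toNat]) n hn hnl j hj0 hjN with ⟨hf, hseek⟩ | ⟨jn, h1, h2, h3, h4⟩
    · rw [pvInner]
      simp only [dif_pos h, hgetY, hf, if_pos (le_refl N)]
      rw [hdropY, pvG]
      simp [hseek]
    · rw [pvInner]
      simp only [dif_pos h, hgetY, h3]
      rw [if_neg (by omega)]
      have hrec := pvBInner X Y N M n m hn hm hnl hml (i+1) ((jn:Int)+1) (cnt+1)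
        (by omega) (by omega) (by omega)
      rw [hrec]
      have e1 : (i+1).toNat = i.toNat + 1 := by omega
      have e2 : ((jn:Int)+1).toNat = jn + 1 := by omega
      rw [e1, e2, hdropY, pvG]
      simp only [h4]
      push_cast
      ring
  · rw [pvInner]
    simp only [dif_neg h]
    have : (Y.toList.take m).drop i.toNat = [] := by
      apply List.drop_eq_nil_of_le
      rw [List.length_take]
      omega
    rw [this]
    simp [pvG]
termination_by (M - i).toNat
decreasing_by omega

theorem pvPortB (X Y : String) (N M : Int) (hN : 0 ≤ N) (hM : 0 < M)
    (hNX : N ≤ PySem.Str.len X) (hMY : M ≤ PySem.Str.len Y) :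
    maxSubsequenceSubstring_alt X Y N M =
      (List.range M.toNat).foldl
        (fun a s => max a ((pvG ((Y.toList.take M.toNat).drop s) (X.toList.take N.toNat) : Int))) 0 := by
  rw [PySem.Str.len_eq] at hNX
  rw [PySem.Str.len_eq] at hMY
  unfold maxSubsequenceSubstring_alt
  rw [PySem.List.pyRange_one 0 M, List.foldl_map]
  rw [show (M - 0).toNat = M.toNat from by omega]
  apply pvFoldlCongr
  intro b k hk
  have hkm : k < M.toNat := List.mem_range.mp hk
  have hrec := pvBInner X Y N M N.toNat M.toNat (by omega) (by omega) (by omega) (by omega)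
    (0 + (k:Int)) 0 0 (by omega) (by omega) (by omega)
  rw [show ((0:Int) + (k:Int)).toNat = k from by omega, show ((0:Int)).toNat = 0 from rfl,
    List.drop_zero] at hrec
  simp only [hrec]
  omega

/- ## port A = dp table -/

-- the dp table state: cell (r,c) holds dpf r c once written (rows < i done; row i done up to col j)
def pvSt (u v : List Char) (m n i j : Nat) : List (List Int) :=
  (List.range (m+1)).map (fun r =>
    (List.range (n+1)).map (fun c =>
      if r < i ∨ (r = i ∧ c ≤ j) then pvDpf u v r c else 0))

theorem pvDpf_zero_left (u v : List Char) (c : Nat) : pvDpf u v 0 c = 0 := by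
  simp [pvDpf]

theorem pvDpf_zero_right (u v : List Char) (i : Nat) : pvDpf u v i 0 = 0 := by
  cases i <;> simp [pvDpf]

theorem pvSt_ext (u v : List Char) (m n : Nat) {i j i' j' : Nat}
    (h : ∀ r c, r ≤ m → c ≤ n →
      (if r < i ∨ (r = i ∧ c ≤ j) then pvDpf u v r c else 0)
        = (if r < i' ∨ (r = i' ∧ c ≤ j') then pvDpf u v r c else 0)) :
    pvSt u v m n i j = pvSt u v m n i' j' := by
  unfold pvSt
  apply List.ext_getElem (by simp)
  intro r hr1 hr2
  simp only [List.getElem_map, List.getElem_range]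
  apply List.ext_getElem (by simp)
  intro c hc1 hc2
  simp only [List.getElem_map, List.getElem_range]
  simp only [List.length_map, List.length_range] at hr1 hc1
  exact h r c (by omega) (by omega)

theorem pvSt_row (u v : List Char) (m n i j r : Nat) (hr : r < m+1) :
    PySem.List.pyGetD (pvSt u v m n i j) (r:Int) []
      = (List.range (n+1)).map (fun c => if r < i ∨ (r = i ∧ c ≤ j) then pvDpf u v r c else 0) := by
  rw [PySem.List.pyGetD_natCast]
  unfold pvSt
  rw [List.getD_eq_getElem _ _ (by simpa using hr)]
  simp

theorem pvSt_get (u v : List Char) (m n i j r c : Nat) (hr : r < m+1) (hc : c < n+1) :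
    pvGet2 (pvSt u v m n i j) (r:Int) (c:Int)
      = if r < i ∨ (r = i ∧ c ≤ j) then pvDpf u v r c else 0 := by
  unfold pvGet2
  rw [pvSt_row u v m n i j r hr, PySem.List.pyGetD_natCast]
  rw [List.getD_eq_getElem _ _ (by simpa using hc)]
  simp

theorem pvSt_write (u v : List Char) (m n i j : Nat) (him : i ≤ m) (_hjn : j < n) :
    pvSet2 (pvSt u v m n i j) (i:Int) ((j+1 : Nat):Int) (pvDpf u v i (j+1))
      = pvSt u v m n i (j+1) := by
  unfold pvSet2
  rw [pvSt_row u v m n i j i (by omega)]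
  simp only [PySem.List.pySetD_natCast]
  conv_lhs => rw [pvSt]
  conv_rhs => rw [pvSt]
  apply List.ext_getElem (by simp)
  intro r hr1 hr2
  rw [List.getElem_set]
  simp only [List.length_map, List.length_range] at hr1 hr2
  simp only [List.getElem_map, List.getElem_range]
  by_cases hri : i = r
  · subst hri
    rw [if_pos rfl]
    apply List.ext_getElem (by simp)
    intro c hc1 hc2
    rw [List.getElem_set]
    simp only [List.length_map, List.length_range] at hc1 hc2
    simp only [List.getElem_map, List.getElem_range]
    by_cases hcj : j+1 = c
    · subst hcj
      rw [if_pos rfl, if_pos (by simp)]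
    · rw [if_neg hcj]
      have hcc : (c ≤ j) = (c ≤ j + 1) := propext (by omega)
      simp only [lt_irrefl, false_or, true_and, hcc]
  · rw [if_neg hri]
    have : ∀ c : Nat, (r < i ∨ (r = i ∧ c ≤ j)) = (r < i ∨ (r = i ∧ c ≤ j+1)) := by
      intro c
      apply propext
      constructor
      · rintro (h | ⟨h1, h2⟩)
        · exact Or.inl h
        · exact absurd h1.symm hri
      · rintro (h | ⟨h1, h2⟩)
        · exact Or.inl h
        · exact absurd h1.symm hri
    simp only [this]

theorem pvSt_row_start (u v : List Char) (m n i : Nat) :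
    pvSt u v m n i n = pvSt u v m n (i+1) 0 := by
  apply pvSt_ext
  intro r c hr hc
  by_cases h1 : r < i ∨ (r = i ∧ c ≤ n)
  · rw [if_pos h1, if_pos (by omega)]
  · rw [if_neg h1]
    by_cases h2 : r < i+1 ∨ (r = i+1 ∧ c ≤ 0)
    · rw [if_pos h2]
      have hr1 : r = i+1 ∧ c = 0 := by omega
      rw [hr1.2, pvDpf_zero_right]
    · rw [if_neg h2]

theorem pvPortA (X Y : String) (N M : Int) (hN : 0 ≤ N) (hM : 0 < M)
    (hNX : N ≤ PySem.Str.len X) (hMY : M ≤ PySem.Str.len Y) :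
    maxSubsequenceSubstring X Y N M =
      (List.range M.toNat).foldl
        (fun a t => max a (pvDpf (X.toList.take N.toNat) (Y.toList.take M.toNat) (t+1) N.toNat)) 0 := by
  rw [PySem.Str.len_eq] at hNX
  rw [PySem.Str.len_eq] at hMY
  set n := N.toNat with hn
  set m := M.toNat with hm
  set u := X.toList.take n with hu
  set v := Y.toList.take m with hv
  have hnN : (n : Int) = N := by omega
  have hmM : (m : Int) = M := by omega
  have hnl : n ≤ X.toList.length := by omega
  have hml : m ≤ Y.toList.length := by omega
  have hul : u.length = n := by rw [hu, List.length_take]; omega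
  have hvl : v.length = m := by rw [hv, List.length_take]; omega
  -- the characters the loops compare
  have hcx : ∀ j : Nat, j < n → PySem.Str.pyGet? X (j:Int) = some (u.getD j 'a') := by
    intro j hj
    rw [PySem.Str.pyGet?_natCast, List.getElem?_eq_getElem (by omega)]
    rw [hu, List.getD_eq_getElem _ _ (by rw [List.length_take]; omega), List.getElem_take]
  have hcy : ∀ i : Nat, i < m → PySem.Str.pyGet? Y (i:Int) = some (v.getD i 'a') := by
    intro i hi
    rw [PySem.Str.pyGet?_natCast, List.getElem?_eq_getElem (by omega)]
    rw [hv, List.getD_eq_getElem _ _ (by rw [List.length_take]; omega), List.getElem_take]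
  -- one column step preserves the invariant
  have step : ∀ i j : Nat, 1 ≤ i → i ≤ m → j < n →
      pvColf X Y (pvSt u v m n i j) (i:Int) ((j+1 : Nat):Int) = pvSt u v m n i (j+1) := by
    intro i j hi1 him hjn
    have e1 : ((j+1 : Nat):Int) - 1 = (j : Int) := by push_cast; ring
    have e2 : ((i : Nat):Int) - 1 = ((i-1 : Nat) : Int) := by omega
    unfold pvColf
    rw [e1, e2, hcx j hjn, hcy (i-1) (by omega)]
    have g1 : pvGet2 (pvSt u v m n i j) ((i-1 : Nat):Int) ((j:Nat):Int) = pvDpf u v (i-1) j := by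
      rw [pvSt_get u v m n i j (i-1) j (by omega) (by omega), if_pos (Or.inl (by omega))]
    have g2 : pvGet2 (pvSt u v m n i j) ((i : Nat):Int) ((j:Nat):Int) = pvDpf u v i j := by
      rw [pvSt_get u v m n i j i j (by omega) (by omega), if_pos (Or.inr ⟨rfl, le_refl j⟩)]
    have hdpf : pvDpf u v i (j+1)
        = if u.getD j 'a' = v.getD (i-1) 'a' then 1 + pvDpf u v (i-1) j else pvDpf u v i j := by
      conv_lhs => rw [show i = (i-1)+1 from by omega]
      rw [pvDpf]
      rw [show (i-1)+1 = i from by omega]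
    by_cases hch : u.getD j 'a' = v.getD (i-1) 'a'
    · rw [if_pos (by rw [hch]), g1]
      rw [show (1 + pvDpf u v (i-1) j) = pvDpf u v i (j+1) from by rw [hdpf, if_pos hch]]
      exact pvSt_write u v m n i j him hjn
    · rw [if_neg (by simpa using hch), g2]
      rw [show (pvDpf u v i j) = pvDpf u v i (j+1) from by rw [hdpf, if_neg hch]]
      exact pvSt_write u v m n i j him hjn
  -- the whole inner loop fills row i
  have hinner : ∀ i : Nat, 1 ≤ i → i ≤ m →
      pvRowLoop X Y N (pvSt u v m n i 0) (i:Int) = pvSt u v m n i n := by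
    intro i hi1 him
    unfold pvRowLoop
    rw [PySem.List.pyRange_one 1 (N+1), show (N+1-1).toNat = n from by omega, List.foldl_map]
    have : ∀ j : Nat, j ≤ n →
        (List.range j).foldl (fun dp (k : Nat) => pvColf X Y dp (i:Int) (1 + (k:Int)))
          (pvSt u v m n i 0) = pvSt u v m n i j := by
      intro j
      induction j with
      | zero => intro _; rfl
      | succ j ih =>
        intro hj
        rw [List.range_succ, List.foldl_append, ih (by omega)]
        simp only [List.foldl_cons, List.foldl_nil]
        rw [show (1 + (j:Int)) = ((j+1 : Nat):Int) from by push_cast; ring]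
        exact step i j hi1 him (by omega)
    exact this n (le_refl n)
  -- the outer loop fills the whole table
  have houter :
      (PySem.List.pyRange 1 (M+1) 1).foldl (pvRowLoop X Y N) (pvSt u v m n 0 n)
      = pvSt u v m n m n := by
    rw [PySem.List.pyRange_one 1 (M+1), show (M+1-1).toNat = m from by omega, List.foldl_map]
    have : ∀ i : Nat, i ≤ m →
        (List.range i).foldl (fun dp (k : Nat) => pvRowLoop X Y N dp (1 + (k:Int)))
          (pvSt u v m n 0 n) = pvSt u v m n i n := by
      intro i
      induction i with
      | zero => intro _; rfl
      | succ i ih =>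
        intro hi
        rw [List.range_succ, List.foldl_append, ih (by omega)]
        simp only [List.foldl_cons, List.foldl_nil]
        rw [show (1 + (i:Int)) = ((i+1 : Nat):Int) from by push_cast; ring]
        rw [pvSt_row_start u v m n i]
        exact hinner (i+1) (by omega) (by omega)
    exact this m (le_refl m)
  -- the initial table is the all-zero state
  have hdp0 : (PySem.List.pyRange 0 (M+1) 1).map (fun _ => List.replicate (N+1).toNat (0:Int))
      = pvSt u v m n 0 n := by
    rw [PySem.List.pyRange_one 0 (M+1), List.map_map]
    unfold pvSt
    apply List.ext_getElem (by simp; omega)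
    intro r hr1 hr2
    simp only [List.getElem_map, List.getElem_range, Function.comp]
    simp only [List.length_map, List.length_range] at hr2
    apply List.ext_getElem (by simp; omega)
    intro c hc1 hc2
    simp only [List.getElem_replicate, List.getElem_map, List.getElem_range]
    by_cases h : r < 0 ∨ (r = 0 ∧ c ≤ n)
    · rw [if_pos h]
      have : r = 0 := by omega
      rw [this, pvDpf_zero_left]
    · rw [if_neg h]
  -- assemble
  simp only [maxSubsequenceSubstring]
  rw [hdp0, houter]
  rw [PySem.List.pyRange_one 1 (M+1), show (M+1-1).toNat = m from by omega, List.foldl_map]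
  apply pvFoldlCongr
  intro a t ht
  have htm : t < m := List.mem_range.mp ht
  rw [show (1 + (t:Int)) = ((t+1 : Nat):Int) from by push_cast; ring,
    show N = ((n:Nat):Int) from by omega]
  rw [pvSt_get u v m n m n (t+1) n (by omega) (by omega)]
  rw [if_pos (by omega)]

-- ===== VERDICT (by name: the statement is the Claim_ definition above) =====
theorem maxSubsequenceSubstring_spec : Claim_equal_maxSubsequenceSubstring := by
  intro X Y N M _ hPre
  unfold Spec_maxSubsequenceSubstring
  by_cases hM0 : M ≤ 0
  · -- M ≤ 0: both folds run over empty ranges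
    have h1 : PySem.List.pyRange 1 (M+1) 1 = [] := PySem.List.pyRange_one_eq_nil (by omega)
    have h2 : PySem.List.pyRange 0 M 1 = [] := PySem.List.pyRange_one_eq_nil (by omega)
    simp [maxSubsequenceSubstring, maxSubsequenceSubstring_alt, h1, h2]
  · rcases hPre with hM | ⟨hN, hNX, hdisj⟩
    · exact absurd hM hM0
    · by_cases hMY : M ≤ PySem.Str.len Y
      · -- the generic case
        rw [pvPortA X Y N M hN (by omega) hNX hMY, pvPortB X Y N M hN (by omega) hNX hMY]
        rw [PySem.Str.len_eq] at hNX
        rw [PySem.Str.len_eq] at hMY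
        have hv : (Y.toList.take M.toNat).length = M.toNat := by
          rw [List.length_take]; omega
        have := pvMain (X.toList.take N.toNat) (Y.toList.take M.toNat) N.toNat
          (by rw [List.length_take]; omega)
        rw [hv] at this
        exact this
      · -- N = 0 and M > len(Y): A's inner loop body never runs, B's scans all break at once
        have hN0 : N = 0 := by tauto
        subst hN0
        have hA : maxSubsequenceSubstring X Y 0 M = 0 := by
          simp only [maxSubsequenceSubstring]
          have hrow : ∀ dp i, pvRowLoop X Y 0 dp i = dp := by
            intro dp i
            unfold pvRowLoop
            rw [PySem.List.pyRange_one_eq_nil (by omega)]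
            rfl
          have hfold : ∀ (l : List Int) dp, l.foldl (pvRowLoop X Y 0) dp = dp := by
            intro l
            induction l with
            | nil => intro dp; rfl
            | cons z l ih => intro dp; rw [List.foldl_cons, hrow]; exact ih dp
          rw [hfold]
          apply le_antisymm
          · apply pvF2
            · exact le_refl 0
            · intro i hi
              have hmem := (PySem.List.mem_pyRange_one).mp hi
              have hlen : ((PySem.List.pyRange 0 (M+1) 1).map
                  (fun _ => List.replicate ((0:Int)+1).toNat (0:Int))).length = (M+1).toNat := by
                rw [List.length_map, PySem.List.length_pyRange_one]
                omega
              have hrowv : PySem.List.pyGetD ((PySem.List.pyRange 0 (M+1) 1).map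
                  (fun _ => List.replicate ((0:Int)+1).toNat (0:Int))) i []
                  = List.replicate ((0:Int)+1).toNat (0:Int) := by
                rw [PySem.List.pyGetD_eq_getElem _ _ (by omega) (by rw [hlen]; omega)]
                rw [List.getElem_map]
              unfold pvGet2
              rw [hrowv]
              decide
          · exact pvF0 _ _ 0
        have hB : maxSubsequenceSubstring_alt X Y 0 M = 0 := by
          unfold maxSubsequenceSubstring_alt
          have hcnt : ∀ s ∈ PySem.List.pyRange 0 M 1, pvInner X Y 0 M s 0 0 = 0 := by
            intro s hs
            have hmem := (PySem.List.mem_pyRange_one).mp hs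
            rw [pvInner]
            rw [dif_pos (by omega)]
            have hfind : pvFind X 0 (PySem.Str.pyGet? Y s) 0 = 0 := by
              rw [pvFind]
              simp
            simp only [hfind, if_pos (le_refl (0:Int))]
          rw [pvFoldlCongr (PySem.List.pyRange 0 M 1) _ (fun a _ => max a (0:Int)) 0
            (by intro b x hx; simp only [hcnt x hx]; omega)]
          apply le_antisymm
          · exact pvF2 _ (fun _ => (0:Int)) 0 0 (le_refl 0) (by intro x _; exact le_refl 0)
          · exact pvF0 _ (fun _ => (0:Int)) 0
        rw [hA, hB]
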